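-- pv_equiv track=rewrite | github.com/anhkhoakz/TDT_Semester_5 | Design and Analysis of Algorithms/midterm/TKN/main2.py | filter_transactions_by_secondary_a
-- ===== SOURCE A (Python) =====
-- def filter_transactions_by_secondary_a(
--     transactions: dict, sorted_secondary_a: list
-- ) -> dict:
--     """Filter transactions based on items in sorted_secondary_a."""
--     secondary_set = set(sorted_secondary_a)
--     return {
--         tid: {item: qty for item, qty in items.items() if item in secondary_set}
--         for tid, items in transactions.items()
--         if any(item in secondary_set for item in items)
--     }
-- ===== SOURCE B (Python) =====
-- def filter_transactions_by_secondary_a(transactions: dict, sorted_secondary_a: list) -> dict: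
--     """Filter transactions based on items in sorted_secondary_a."""
--     keys = sorted(set(sorted_secondary_a))
--
--     def member(x):
--         lo, hi = 0, len(keys)
--         while lo < hi:
--             mid = (lo + hi) // 2
--             if keys[mid] < x:
--                 lo = mid + 1
--             else:
--                 hi = mid
--         return lo < len(keys) and keys[lo] == x
--
--     result = {}
--     for tid, items in transactions.items():
--         filtered = {}
--         for item, qty in items.items():
--             if member(item):
--                 filtered[item] = qty
--         if filtered:
--             result[tid] = filtered
--     return result
-- ===== Notes on version B (the rewrite author's own statement) =====
-- stated objective: alternative
-- what changed: B replaces A's hash-set membership with a sorted deduplicated key list probed by a hand-written binary search, and builds each filtered transaction with explicit accumulator loops kept only when non-empty, instead of A's any() pre-scan plus nested dict comprehensions.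
import Mathlib
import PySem

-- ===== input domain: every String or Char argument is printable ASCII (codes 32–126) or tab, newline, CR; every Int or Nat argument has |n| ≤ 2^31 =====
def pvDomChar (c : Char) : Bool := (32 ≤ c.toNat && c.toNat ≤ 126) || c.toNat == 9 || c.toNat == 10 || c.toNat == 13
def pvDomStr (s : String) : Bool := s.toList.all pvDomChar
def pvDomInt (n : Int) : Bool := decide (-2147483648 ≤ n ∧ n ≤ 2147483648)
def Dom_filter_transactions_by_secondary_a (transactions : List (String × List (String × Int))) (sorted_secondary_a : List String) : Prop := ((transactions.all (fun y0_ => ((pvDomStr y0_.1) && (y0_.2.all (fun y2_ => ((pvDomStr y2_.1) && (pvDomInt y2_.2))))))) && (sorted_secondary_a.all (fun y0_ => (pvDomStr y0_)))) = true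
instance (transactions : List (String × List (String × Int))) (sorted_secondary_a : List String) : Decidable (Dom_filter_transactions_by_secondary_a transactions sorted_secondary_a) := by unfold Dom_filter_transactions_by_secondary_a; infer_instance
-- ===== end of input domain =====

-- B looks items up by binary search in a sorted deduplicated key list instead of A's hash set, and
-- builds each filtered transaction with explicit accumulator loops kept only when non-empty,
-- instead of A's any() pre-scan plus nested dict comprehensions (alternative, same result).

-- ===== PORT A =====
-- dict comprehension over transactions.items() with an 'if any(...)' guard; keys of a dict are
-- unique, so the comprehension is filter-then-map over the items list
def filter_transactions_by_secondary_a (transactions : List (String × List (String × Int))) (sorted_secondary_a : List String) : List (String × List (String × Int)) :=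
  let secondarySet : PySem.Set String := PySem.Set.ofList sorted_secondary_a
  (((PySem.Dict.ofList transactions).items.filter
      (fun p => (PySem.Dict.ofList p.2).keys.any (fun item => PySem.Set.contains secondarySet item))).map
    (fun p => (p.1, (PySem.Dict.ofList p.2).items.filter (fun q => PySem.Set.contains secondarySet q.1))))

-- ===== PORT B =====
-- Source B's while-loop binary search, as structural recursion on hi - lo; lo and hi stay in
-- 0..len(keys) so Nat arithmetic and List.getD index exactly what Python's keys[mid] reads,
-- and (lo+hi)//2 on nonnegative ints is Nat division
def pvBsearch (keys : List String) (x : String) (lo hi : Nat) : Bool :=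
  if h : lo < hi then
    let mid := (lo + hi) / 2
    if keys.getD mid "" < x then pvBsearch keys x (mid + 1) hi
    else pvBsearch keys x lo mid
  else
    decide (lo < keys.length ∧ keys.getD lo "" = x)
termination_by hi - lo
decreasing_by all_goals omega

-- Source B's member(x): binary search over the whole keys list
def pvMember (keys : List String) (x : String) : Bool :=
  pvBsearch keys x 0 keys.length

-- explicit loops: keys = sorted(set(sorted_secondary_a)); build 'filtered' by appending matching
-- pairs (dict insertion on fresh distinct keys = append), add (tid, filtered) if non-empty
def filter_transactions_by_secondary_a_alt (transactions : List (String × List (String × Int))) (sorted_secondary_a : List String) : List (String × List (String × Int)) :=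
  let keys : List String := PySem.List.sorted (PySem.Set.ofList sorted_secondary_a) (fun x => x) false
  (PySem.Dict.ofList transactions).items.foldl
    (fun result p =>
      let filtered := (PySem.Dict.ofList p.2).items.foldl
        (fun f q => if pvMember keys q.1 then f ++ [q] else f) []
      if filtered.isEmpty then result else result ++ [(p.1, filtered)])
    []

-- ===== PRECONDITION & SPEC =====
def Spec_filter_transactions_by_secondary_a (transactions : List (String × List (String × Int))) (sorted_secondary_a : List String) (out : List (String × List (String × Int))) : Prop := out = filter_transactions_by_secondary_a_alt transactions sorted_secondary_a
instance (transactions : List (String × List (String × Int))) (sorted_secondary_a : List String) (out : List (String × List (String × Int))) : Decidable (Spec_filter_transactions_by_secondary_a transactions sorted_secondary_a out) := by unfold Spec_filter_transactions_by_secondary_a; infer_instance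

-- ===== CLAIM (what is proved, stated in full; the proofs are below) =====
def Claim_equal_filter_transactions_by_secondary_a : Prop := ∀ (transactions : List (String × List (String × Int))) (sorted_secondary_a : List String), Dom_filter_transactions_by_secondary_a transactions sorted_secondary_a → Spec_filter_transactions_by_secondary_a transactions sorted_secondary_a (filter_transactions_by_secondary_a transactions sorted_secondary_a)

-- ===== LEMMAS AND PROOFS =====

-- binary search on a (weakly) sorted list decides membership: if everything before lo is < x and
-- everything from hi on is ≥ x, pvBsearch answers 'x ∈ keys'
theorem pv_bsearch_eq (keys : List String) (x : String)
    (hs : keys.Pairwise (· ≤ ·)) :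
    ∀ n lo hi, hi - lo = n → lo ≤ hi → hi ≤ keys.length →
      (∀ j (hj : j < keys.length), j < lo → keys[j] < x) →
      (∀ j (hj : j < keys.length), hi ≤ j → x ≤ keys[j]) →
      pvBsearch keys x lo hi = keys.contains x := by
  have hmono : ∀ i j (hi : i < keys.length) (hj : j < keys.length), i ≤ j → keys[i] ≤ keys[j] := by
    intro i j hi hj hij
    rcases Nat.lt_or_ge i j with h | h
    · exact (List.pairwise_iff_getElem.mp hs) i j hi hj h
    · have : i = j := by omega
      subst this; exact le_refl _
  intro n
  induction n using Nat.strong_induction_on with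
  | _ n ih =>
    intro lo hi hn hle hhi hlo_inv hhi_inv
    unfold pvBsearch
    by_cases h : lo < hi
    · simp only [h, dif_pos]
      set mid := (lo + hi) / 2 with hmid
      have hmlt : mid < hi := by omega
      have hmge : lo ≤ mid := by omega
      have hmlen : mid < keys.length := by omega
      have hgetd : keys.getD mid "" = keys[mid] := List.getD_eq_getElem keys "" hmlen
      by_cases hc : keys.getD mid "" < x
      · simp only [hc, if_pos]
        refine ih (hi - (mid + 1)) (by omega) (mid + 1) hi (by omega) (by omega) hhi ?_ hhi_inv
        intro j hj hjlt
        have : keys[j] ≤ keys[mid] := hmono j mid hj hmlen (by omega)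
        calc keys[j] ≤ keys[mid] := this
          _ < x := by rwa [hgetd] at hc
      · simp only [hc, if_neg, not_false_eq_true]
        refine ih (mid - lo) (by omega) lo mid (by omega) (by omega) (by omega) hlo_inv ?_
        intro j hj hjge
        have hx : x ≤ keys[mid] := by rw [← hgetd]; exact le_of_not_gt hc
        exact le_trans hx (hmono mid j hmlen hj hjge)
    · simp only [h, dif_neg, not_false_eq_true]
      have hlohi : lo = hi := by omega
      subst hlohi
      have hiff : (lo < keys.length ∧ keys.getD lo "" = x) ↔ x ∈ keys := by
        constructor
        · rintro ⟨hlt, heq⟩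
          rw [← heq, List.getD_eq_getElem keys "" hlt]
          exact List.getElem_mem hlt
        · intro hmem
          obtain ⟨j, hj, hje⟩ := List.getElem_of_mem hmem
          have hjge : lo ≤ j := by
            by_contra hlt
            exact absurd hje (ne_of_lt (hlo_inv j hj (by omega)))
          have hlt : lo < keys.length := by omega
          have h1 : x ≤ keys[lo] := hhi_inv lo hlt (le_refl _)
          have h2 : keys[lo] ≤ keys[j] := hmono lo j hlt hj hjge
          refine ⟨hlt, ?_⟩
          rw [List.getD_eq_getElem keys "" hlt]
          exact le_antisymm (by rw [← hje]; exact h2) h1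
      have hc : keys.contains x = decide (x ∈ keys) := by simp
      rw [hc, decide_eq_decide]
      exact hiff

-- member(x) over keys = sorted(set(l)) answers exactly 'x in set(l)'
theorem pv_member_eq (l : List String) (x : String) :
    pvMember (PySem.List.sorted (PySem.Set.ofList l) (fun y => y) false) x
      = PySem.Set.contains (PySem.Set.ofList l) x := by
  set keys := PySem.List.sorted (PySem.Set.ofList l) (fun y => y) false with hk
  have hs : keys.Pairwise (· ≤ ·) := by
    have := PySem.List.sorted_pairwise (xs := PySem.Set.ofList l) (key := fun y => y)
    simpa using this
  have h1 : pvMember keys x = keys.contains x :=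
    pv_bsearch_eq keys x hs (keys.length - 0) 0 keys.length rfl (Nat.zero_le _) (le_refl _)
      (by intro j hj hjl; omega) (by intro j hj hjge; omega)
  have h2 : (x ∈ keys) ↔ x ∈ PySem.Set.ofList l := by
    rw [hk]
    exact PySem.List.mem_sorted (x := x) (xs := PySem.Set.ofList l) (key := fun y => y) (rev := false)
  rw [h1]
  simp only [PySem.Set.contains]
  simp [h2]

-- the inner append-if loop is a filter
theorem pv_inner_eq_filter (p : String → Bool) (l : List (String × Int)) :
    l.foldl (fun f q => if p q.1 then f ++ [q] else f) [] =
      l.filter (fun q => p q.1) := by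
  simpa using PySem.List.foldl_append_if (f := (id : String × Int → String × Int)) (p := fun q => p q.1) (l := l) (acc := [])

-- a filtered items list is empty exactly when no key matched
theorem pv_isEmpty_filter (p : String → Bool) (l : List (String × Int)) :
    (l.filter (fun q => p q.1)).isEmpty = !(l.map (·.1)).any p := by
  induction l with
  | nil => rfl
  | cons q l ih =>
    rw [List.filter_cons, List.map_cons, List.any_cons]
    cases h : p q.1 with
    | true => simp only [if_true, List.isEmpty_cons, Bool.true_or, Bool.not_true]
    | false => simp only [Bool.false_eq_true, if_false, Bool.false_or, ih]

-- B's outer loop over any items list equals A's filter-then-map, for any membership test p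
theorem pv_outer (p : String → Bool) (L : List (String × List (String × Int)))
    (acc : List (String × List (String × Int))) :
    L.foldl
      (fun result q =>
        let filtered := (PySem.Dict.ofList q.2).items.foldl
          (fun f r => if p r.1 then f ++ [r] else f) []
        if filtered.isEmpty then result else result ++ [(q.1, filtered)])
      acc
    = acc ++ ((L.filter
        (fun q => (PySem.Dict.ofList q.2).keys.any p)).map
      (fun q => (q.1, (PySem.Dict.ofList q.2).items.filter (fun r => p r.1)))) := by
  induction L generalizing acc with
  | nil => simp
  | cons q L ih =>
    have hkeys : (PySem.Dict.ofList q.2).keys = (PySem.Dict.ofList q.2).items.map (·.1) := rfl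
    rw [List.foldl_cons, ih, List.filter_cons]
    cases h : (PySem.Dict.ofList q.2).keys.any p with
    | true =>
      have he : ((PySem.Dict.ofList q.2).items.filter (fun r => p r.1)).isEmpty = false := by
        rw [pv_isEmpty_filter, ← hkeys, h]; rfl
      simp only [pv_inner_eq_filter, he, Bool.false_eq_true, if_false, if_true, List.map_cons,
        List.append_assoc, List.singleton_append]
    | false =>
      have he : ((PySem.Dict.ofList q.2).items.filter (fun r => p r.1)).isEmpty = true := by
        rw [pv_isEmpty_filter, ← hkeys, h]; rfl
      simp only [pv_inner_eq_filter, he, Bool.false_eq_true, if_true, if_false]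

-- ===== VERDICT (by name: the statement is the Claim_ definition above) =====
theorem filter_transactions_by_secondary_a_spec : Claim_equal_filter_transactions_by_secondary_a := by
  intro transactions sorted_secondary_a _
  unfold Spec_filter_transactions_by_secondary_a
  unfold filter_transactions_by_secondary_a filter_transactions_by_secondary_a_alt
  have hp : pvMember (PySem.List.sorted (PySem.Set.ofList sorted_secondary_a) (fun y => y) false)
      = fun x => PySem.Set.contains (PySem.Set.ofList sorted_secondary_a) x := by
    funext x; exact pv_member_eq sorted_secondary_a x
  simp only [hp]
  rw [pv_outer]
  simp only [List.nil_append]
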